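-- pv_equiv track=rewrite | github.com/EDSChrono/AdventOfCode | 2022/Python/17.py | base_sig
-- ===== SOURCE A (Python) =====
-- def base_sig(S,r):
--     ymax = []
--     for x in range(r):
--         S_x = {(xS,yS) for (xS,yS) in S if xS == x}
--         ym = -1
--         for s in S_x:
--             if s[1]>ym:
--                 ym=s[1]
--         ymax.append(ym)
--     yminmax=min(ymax)
--     full_row = set()
--     for x in range(r):
--         full_row.add((x,yminmax) in S)
--     if all(full_row):
--         S = S - {(x,y) for (x,y) in S if y<yminmax}
--         S = {(x,y-yminmax) for (x,y) in S}
--     return S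
-- ===== SOURCE B (Python) =====
-- def base_sig(S, r):
--     # one pass over S builds per-column maxima; trim in a single filtered comprehension
--     colmax = {}
--     for (x, y) in S:
--         if 0 <= x < r and y > colmax.get(x, -1):
--             colmax[x] = y
--     yminmax = min(colmax.get(x, -1) for x in range(r))
--     if all((x, yminmax) in S for x in range(r)):
--         return {(x, y - yminmax) for (x, y) in S if y >= yminmax}
--     return S
-- ===== Notes on version B (the rewrite author's own statement) =====
-- stated objective: faster
-- what changed: Instead of scanning the whole set once per column (r passes, each building a per-column subset), B makes one pass over S building a dict of per-column maxima, takes the min over the r columns, and trims with a single filtered comprehension instead of a set difference plus a second comprehension.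
import Mathlib
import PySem

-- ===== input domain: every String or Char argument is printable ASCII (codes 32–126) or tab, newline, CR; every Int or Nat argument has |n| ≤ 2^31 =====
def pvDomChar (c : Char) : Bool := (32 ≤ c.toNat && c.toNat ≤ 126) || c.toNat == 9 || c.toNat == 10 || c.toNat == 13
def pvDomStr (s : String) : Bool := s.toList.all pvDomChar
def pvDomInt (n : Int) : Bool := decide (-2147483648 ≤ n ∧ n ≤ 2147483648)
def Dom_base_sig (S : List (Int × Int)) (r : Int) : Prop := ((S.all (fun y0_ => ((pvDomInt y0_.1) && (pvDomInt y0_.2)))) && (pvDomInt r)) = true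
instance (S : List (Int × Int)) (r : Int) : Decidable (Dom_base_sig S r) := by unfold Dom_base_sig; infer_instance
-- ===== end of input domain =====

-- B changes the algorithm: one pass over S building a dict of per-column maxima instead of one scan of S per column.
-- The equivalence is about the returned set; neither version mutates its caller-visible arguments.

-- ===== PORT A =====
-- A's inner loop for one column x: max y over {(xS,yS) in S | xS == x}, -1 if empty
def A_colmax (S : List (Int × Int)) (x : Int) : Int :=
  (PySem.Set.ofList (S.filter (fun p => p.1 == x))).foldl
    (fun ym s => if s.2 > ym then s.2 else ym) (-1)

def base_sig (S : List (Int × Int)) (r : Int) : List (Int × Int) :=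
  let ymax : List Int :=
    (PySem.List.pyRange 0 r 1).foldl (fun acc x => acc ++ [A_colmax S x]) []
  match PySem.List.min? ymax (fun y => y) with
  | none => S   -- Python: min([]) raises ValueError here (r ≤ 0); excluded by Pre_
  | some yminmax =>
    let full_row : PySem.Set Bool :=
      (PySem.List.pyRange 0 r 1).foldl
        (fun fr x => PySem.Set.add fr (PySem.Set.contains S (x, yminmax))) PySem.Set.empty
    if full_row.all (fun b => b) then
      let removed := PySem.Set.ofList (S.filter (fun p => p.2 < yminmax))
      let S1 := PySem.Set.diff (PySem.Set.ofList S) removed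
      PySem.Set.ofList (S1.map (fun p => (p.1, p.2 - yminmax)))
    else S

-- ===== PORT B =====
-- one pass over S: dict of per-column maxima (columns 0..r-1 only)
def B_colmax (S : List (Int × Int)) (r : Int) : PySem.Dict Int Int :=
  S.foldl
    (fun d p =>
      if 0 ≤ p.1 ∧ p.1 < r ∧ PySem.Dict.getD d p.1 (-1) < p.2
      then PySem.Dict.insert d p.1 p.2 else d)
    PySem.Dict.empty

def base_sig_alt (S : List (Int × Int)) (r : Int) : List (Int × Int) :=
  let d := B_colmax S r
  match PySem.List.min? ((PySem.List.pyRange 0 r 1).map (fun x => PySem.Dict.getD d x (-1))) (fun y => y) with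
  | none => S   -- Python: min over an empty generator raises ValueError (r ≤ 0); excluded by Pre_
  | some yminmax =>
    if (PySem.List.pyRange 0 r 1).all (fun x => PySem.Set.contains S (x, yminmax)) then
      PySem.Set.ofList ((S.filter (fun p => yminmax ≤ p.2)).map (fun p => (p.1, p.2 - yminmax)))
    else S

-- ===== PRECONDITION & SPEC =====
-- r ≥ 1: for r ≤ 0 both Pythons raise ValueError (min of an empty sequence)
def Pre_base_sig (S : List (Int × Int)) (r : Int) : Prop := 1 ≤ r
instance (S : List (Int × Int)) (r : Int) : Decidable (Pre_base_sig S r) := by unfold Pre_base_sig; infer_instance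
def pvWitness_base_sig : (List (Int × Int)) × Int := ([(0, 0), (1, 2)], 2)

def Spec_base_sig (S : List (Int × Int)) (r : Int) (out : List (Int × Int)) : Prop := out = base_sig_alt S r
instance (S : List (Int × Int)) (r : Int) (out : List (Int × Int)) : Decidable (Spec_base_sig S r out) := by unfold Spec_base_sig; infer_instance

-- ===== CLAIM (what is proved, stated in full; the proofs are below) =====
def Claim_equal_base_sig : Prop := ∀ (S : List (Int × Int)) (r : Int), Dom_base_sig S r → Pre_base_sig S r → Spec_base_sig S r (base_sig S r)

-- ===== LEMMAS AND PROOFS =====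

-- the running-max loop body of A is `max`
lemma step_eq_max : (fun (ym : Int) (s : Int × Int) => if s.2 > ym then s.2 else ym)
    = (fun (ym : Int) (s : Int × Int) => max ym s.2) := by
  funext ym s; split <;> omega

-- characterisation of the running max
lemma maxfold_char (l : List (Int × Int)) (a : Int) :
    a ≤ l.foldl (fun ym s => max ym s.2) a ∧
    (∀ p ∈ l, p.2 ≤ l.foldl (fun ym s => max ym s.2) a) ∧
    (l.foldl (fun ym s => max ym s.2) a = a ∨ ∃ p ∈ l, l.foldl (fun ym s => max ym s.2) a = p.2) := by
  induction l generalizing a with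
  | nil => simp
  | cons q t ih =>
    obtain ⟨h1, h2, h3⟩ := ih (max a q.2)
    refine ⟨le_trans (le_max_left _ _) h1, ?_, ?_⟩
    · intro p hp
      rcases List.mem_cons.mp hp with rfl | hp
      · exact le_trans (le_max_right _ _) h1
      · exact h2 p hp
    · rcases h3 with h | ⟨p, hp, h⟩
      · rcases max_choice a q.2 with hm | hm
        · exact Or.inl (by simp [List.foldl_cons]; omega)
        · exact Or.inr ⟨q, List.mem_cons_self, by simp [List.foldl_cons]; omega⟩
      · exact Or.inr ⟨p, List.mem_cons_of_mem _ hp, h⟩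

-- the running max only depends on the SET of elements
lemma maxfold_mem_congr (l₁ l₂ : List (Int × Int)) (a : Int)
    (h : ∀ p, p ∈ l₁ ↔ p ∈ l₂) :
    l₁.foldl (fun ym s => max ym s.2) a = l₂.foldl (fun ym s => max ym s.2) a := by
  obtain ⟨h1a, h1b, h1c⟩ := maxfold_char l₁ a
  obtain ⟨h2a, h2b, h2c⟩ := maxfold_char l₂ a
  apply le_antisymm
  · rcases h1c with e | ⟨p, hp, e⟩
    · omega
    · rw [e]; exact h2b p ((h p).mp hp)
  · rcases h2c with e | ⟨p, hp, e⟩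
    · omega
    · rw [e]; exact h1b p ((h p).mpr hp)

-- B's dict lookup computes the per-column running max
lemma dict_colmax (r : Int) (x : Int) (hx0 : 0 ≤ x) (hxr : x < r) :
    ∀ (l : List (Int × Int)) (d : PySem.Dict Int Int),
      PySem.Dict.getD
        (l.foldl (fun d p =>
          if 0 ≤ p.1 ∧ p.1 < r ∧ PySem.Dict.getD d p.1 (-1) < p.2
          then PySem.Dict.insert d p.1 p.2 else d) d) x (-1)
      = (l.filter (fun p => p.1 == x)).foldl (fun ym s => max ym s.2) (PySem.Dict.getD d x (-1)) := by
  intro l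
  induction l with
  | nil => intro d; simp
  | cons q t ih =>
    intro d
    by_cases hq : q.1 = x
    · subst hq
      simp only [List.foldl_cons, List.filter_cons, BEq.rfl, if_true, ih]
      by_cases hlt : PySem.Dict.getD d q.1 (-1) < q.2
      · rw [if_pos ⟨hx0, hxr, hlt⟩, PySem.Dict.getD_insert_self]
        congr 1; omega
      · rw [if_neg (by tauto)]
        congr 1; omega
    · have hbeq : (q.1 == x) = false := by simpa using hq
      simp only [List.foldl_cons, List.filter_cons, hbeq, if_false, Bool.false_eq_true]
      by_cases hc : 0 ≤ q.1 ∧ q.1 < r ∧ PySem.Dict.getD d q.1 (-1) < q.2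
      · rw [if_pos hc, ih, PySem.Dict.getD_insert, if_neg (fun h => hq h.symm)]
      · rw [if_neg hc, ih]

-- A's per-column max equals B's dict lookup
lemma colmax_agree (S : List (Int × Int)) (r : Int) (x : Int) (hx0 : 0 ≤ x) (hxr : x < r) :
    A_colmax S x = PySem.Dict.getD (B_colmax S r) x (-1) := by
  unfold A_colmax B_colmax
  rw [step_eq_max, dict_colmax r x hx0 hxr, PySem.Dict.getD_empty]
  exact maxfold_mem_congr _ _ _ (fun p => PySem.Set.mem_ofList _ _)

-- accumulating booleans into a set and testing `all` is the plain `all` of the list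
lemma set_add_all (l : List Int) (f : Int → Bool) :
    ∀ (s : PySem.Set Bool),
      (l.foldl (fun fr x => PySem.Set.add fr (f x)) s).all (fun b => b)
        = (s.all (fun b => b) && l.all f) := by
  induction l with
  | nil => intro s; simp
  | cons x t ih =>
    intro s
    rw [List.foldl_cons, ih, List.all_cons]
    have : (PySem.Set.add s (f x)).all (fun b => b) = (s.all (fun b => b) && f x) := by
      rw [PySem.Set.add_eq_ite]
      by_cases hm : f x ∈ s
      · rw [if_pos hm]
        cases hall : s.all (fun b => b)
        · simp
        · simp only [Bool.true_and]
          exact (List.all_eq_true.mp hall _ hm).symm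
      · rw [if_neg hm, List.all_append]; simp
    rw [this, Bool.and_assoc]

-- dedup (= Set.ofList) commutes past an injective map of a filtered list
lemma ofList_filter_map (f : Int × Int → Int × Int) (hf : Function.Injective f)
    (p : Int × Int → Bool) (l : List (Int × Int)) :
    PySem.Set.ofList ((l.filter p).map f)
      = ((PySem.Set.ofList l).filter p).map f := by
  induction l using List.reverseRecOn with
  | nil => simp
  | append_singleton xs x ih =>
    rw [List.filter_append, List.map_append, PySem.Set.ofList_append_singleton]
    by_cases hp : p x
    · have hfx : List.map f (List.filter p [x]) = [f x] := by simp [hp]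
      rw [hfx, PySem.Set.ofList_append_singleton, ih]
      by_cases hm : x ∈ PySem.Set.ofList xs
      · rw [PySem.Set.add_of_mem hm, PySem.Set.add_of_mem
          (List.mem_map_of_mem (List.mem_filter.mpr ⟨hm, hp⟩))]
      · have hnew : f x ∉ List.map f (List.filter p (PySem.Set.ofList xs)) := by
          intro hcon
          obtain ⟨q, hq, he⟩ := List.mem_map.mp hcon
          exact hm ((hf he) ▸ (List.mem_filter.mp hq).1)
        rw [PySem.Set.add_of_not_mem hm, PySem.Set.add_of_not_mem hnew,
          List.filter_append, List.map_append]
        congr 1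
        simp [hp]
    · have hfx : List.map f (List.filter p [x]) = [] := by simp [hp]
      rw [hfx, List.append_nil, ih]
      by_cases hm : x ∈ PySem.Set.ofList xs
      · rw [PySem.Set.add_of_mem hm]
      · rw [PySem.Set.add_of_not_mem hm, List.filter_append, List.map_append]
        simp [hp]

-- the shift map is injective
lemma shift_inj (c : Int) : Function.Injective (fun p : Int × Int => (p.1, p.2 - c)) := by
  intro a b h
  simp only [Prod.mk.injEq] at h
  exact Prod.ext h.1 (by omega)

-- A's trim (set difference + shift comprehension) equals B's single filtered comprehension
lemma trim_agree (S : List (Int × Int)) (c : Int) :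
    PySem.Set.ofList ((PySem.Set.diff (PySem.Set.ofList S)
        (PySem.Set.ofList (S.filter (fun p => p.2 < c)))).map (fun p => (p.1, p.2 - c)))
    = PySem.Set.ofList ((S.filter (fun p => c ≤ p.2)).map (fun p => (p.1, p.2 - c))) := by
  have hdiff : PySem.Set.diff (PySem.Set.ofList S) (PySem.Set.ofList (S.filter (fun p => p.2 < c)))
      = (PySem.Set.ofList S).filter (fun p => c ≤ p.2) := by
    show ((PySem.Set.ofList S).filter
        (fun x => !(PySem.Set.contains (PySem.Set.ofList (S.filter (fun p => p.2 < c))) x))) = _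
    apply List.filter_congr
    intro p hp
    have hpS : p ∈ S := (PySem.Set.mem_ofList _ _).mp hp
    by_cases hlt : p.2 < c
    · have h1 : PySem.Set.contains (PySem.Set.ofList (S.filter (fun q => decide (q.2 < c)))) p = true :=
        (PySem.Set.contains_iff _ _).mpr
          ((PySem.Set.mem_ofList _ _).mpr (List.mem_filter.mpr ⟨hpS, by simpa using hlt⟩))
      rw [h1]
      simp only [Bool.not_true]
      exact (decide_eq_false (by omega)).symm
    · have h1 : PySem.Set.contains (PySem.Set.ofList (S.filter (fun q => decide (q.2 < c)))) p = false := by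
        apply Bool.eq_false_iff.mpr
        intro hcon
        exact hlt (by simpa using
          (List.mem_filter.mp ((PySem.Set.mem_ofList _ _).mp ((PySem.Set.contains_iff _ _).mp hcon))).2)
      rw [h1]
      simp only [Bool.not_false]
      exact (decide_eq_true (by omega)).symm
  rw [hdiff, ofList_filter_map _ (shift_inj c), ofList_filter_map _ (shift_inj c),
    PySem.Set.ofList_ofList]

-- the two ymax lists are equal
lemma ymax_agree (S : List (Int × Int)) (r : Int) :
    (PySem.List.pyRange 0 r 1).foldl (fun acc x => acc ++ [A_colmax S x]) []
      = (PySem.List.pyRange 0 r 1).map (fun x => PySem.Dict.getD (B_colmax S r) x (-1)) := by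
  rw [PySem.List.foldl_append_singleton_eq_map, List.nil_append]
  apply List.map_congr_left
  intro x hx
  have hb := PySem.List.mem_pyRange_one.mp hx
  exact colmax_agree S r x hb.1 hb.2

-- ===== VERDICT (by name: the statement is the Claim_ definition above) =====
theorem base_sig_spec : Claim_equal_base_sig := by
  intro S r _hd _hpre
  unfold Spec_base_sig
  simp only [base_sig, base_sig_alt]
  rw [ymax_agree S r]
  cases PySem.List.min? ((PySem.List.pyRange 0 r 1).map
      (fun x => PySem.Dict.getD (B_colmax S r) x (-1))) (fun y => y) with
  | none => rfl
  | some c =>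
    show (if _ then _ else _) = (if _ then _ else _)
    rw [set_add_all]
    simp only [PySem.Set.empty, List.all_nil, Bool.true_and]
    by_cases hfull : (PySem.List.pyRange 0 r 1).all (fun x => PySem.Set.contains S (x, c)) = true
    · rw [if_pos hfull, if_pos hfull]
      exact trim_agree S c
    · rw [if_neg hfull, if_neg hfull]
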